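-- pv_equiv track=rewrite | github.com/Saba-chancho/GOA-homework | day 42/homework/lesson.py | capitals_first
-- ===== SOURCE A (Python) =====
-- def capitals_first(text):
--     lower = []
--     upper = []
--
--     for i in text.split():
--         if i[0].isupper():
--             upper.append(i)
--         elif i[0].islower():
--             lower.append(i)
--
--     return ' '.join(upper + lower)
-- ===== SOURCE B (Python) =====
-- def capitals_first(text):
--     words = [w for w in text.split() if w[0].isupper() or w[0].islower()]
--     return ' '.join(sorted(words, key=lambda w: not w[0].isupper()))
-- ===== Notes on version B (the rewrite author's own statement) =====
-- stated objective: idiomatic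
-- what changed: Replaces the two-accumulator partition loop by a filter of letter-initial words plus a stable sort keyed on whether the first character is not uppercase, relying on sort stability to keep each group in original order.
import Mathlib
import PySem

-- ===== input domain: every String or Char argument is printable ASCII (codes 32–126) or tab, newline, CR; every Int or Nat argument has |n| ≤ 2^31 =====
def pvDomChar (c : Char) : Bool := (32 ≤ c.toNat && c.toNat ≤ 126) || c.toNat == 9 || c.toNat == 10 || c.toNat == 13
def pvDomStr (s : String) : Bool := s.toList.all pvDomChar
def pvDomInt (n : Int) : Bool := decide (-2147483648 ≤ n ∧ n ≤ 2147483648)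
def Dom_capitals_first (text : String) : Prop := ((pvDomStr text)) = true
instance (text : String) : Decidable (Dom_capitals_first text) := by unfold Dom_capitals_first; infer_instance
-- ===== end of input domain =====

-- B replaces A's two-accumulator partition loop by a filter plus a stable sort on a boolean key (idiomatic; same result, not claimed faster).


-- ===== PORT A =====
-- the loop body: i[0].isupper() / elif i[0].islower(); split() yields only nonempty
-- words, so pyGet? is always `some` there (the `none` branch is unreachable)
def pvAstep (st : List String × List String) (i : String) : List String × List String :=
  match PySem.Str.pyGet? i 0 with
  | some c =>
      if PySem.Chars.isupper c then (st.1, st.2 ++ [i])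
      else if PySem.Chars.islower c then (st.1 ++ [i], st.2)
      else st
  | none => st

def capitals_first (text : String) : String :=
  let st := (PySem.Str.split₀ text).foldl pvAstep ([], [])
  PySem.Str.join " " (st.2 ++ st.1)

-- ===== PORT B =====
-- w[0].isupper() / w[0].islower() (false on the unreachable empty word)
def pvUpper0 (w : String) : Bool :=
  match PySem.Str.pyGet? w 0 with
  | some c => PySem.Chars.isupper c
  | none => false

def pvLower0 (w : String) : Bool :=
  match PySem.Str.pyGet? w 0 with
  | some c => PySem.Chars.islower c
  | none => false

def capitals_first_alt (text : String) : String :=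
  let words := (PySem.Str.split₀ text).filter (fun w => pvUpper0 w || pvLower0 w)
  PySem.Str.join " " (PySem.List.sorted words (fun w => !pvUpper0 w))

-- ===== PRECONDITION & SPEC =====
def Spec_capitals_first (text : String) (out : String) : Prop := out = capitals_first_alt text
instance (text : String) (out : String) : Decidable (Spec_capitals_first text out) := by unfold Spec_capitals_first; infer_instance

-- ===== CLAIM (what is proved, stated in full; the proofs are below) =====
def Claim_equal_capitals_first : Prop := ∀ (text : String), Dom_capitals_first text → Spec_capitals_first text (capitals_first text)

-- ===== LEMMAS AND PROOFS =====

-- inserting a false-key element into (all-false ++ all-true) puts it between the blocks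
theorem pv_ins_false {α : Type} (key : α → Bool) (x : α) (hx : key x = false) :
    ∀ (F T : List α), (∀ y ∈ F, key y = false) → (∀ y ∈ T, key y = true) →
      PySem.List.insertBy (fun a b => decide (key a < key b)) x (F ++ T) = F ++ x :: T := by
  intro F
  induction F with
  | nil =>
      intro T _ hT
      cases T with
      | nil => simp [PySem.List.insertBy]
      | cons t ts =>
          have ht : key t = true := hT t (by simp)
          simp [PySem.List.insertBy, hx, ht, Bool.lt_iff]
  | cons f F ih =>
      intro T hF hT
      have hf : key f = false := hF f (by simp)
      have h : decide (key x < key f) = false := by simp [hx, hf]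
      simp only [List.cons_append, PySem.List.insertBy, h, Bool.false_eq_true, if_false]
      simp [ih T (fun y hy => hF y (by simp [hy])) hT]

-- inserting a true-key element appends it at the end
theorem pv_ins_true {α : Type} (key : α → Bool) (x : α) (hx : key x = true) (ys : List α) :
    PySem.List.insertBy (fun a b => decide (key a < key b)) x ys = ys ++ [x] := by
  apply PySem.List.insertBy_of_forall_not_before
  intro y _
  simp [hx, Bool.lt_iff]

-- insertion-sort invariant: the accumulator stays (false-block ++ true-block), each in arrival order
theorem pv_foldl_ins {α : Type} (key : α → Bool) :
    ∀ (ws F T : List α), (∀ y ∈ F, key y = false) → (∀ y ∈ T, key y = true) →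
      ws.foldl (fun acc x => PySem.List.insertBy (fun a b => decide (key a < key b)) x acc) (F ++ T)
        = (F ++ ws.filter (fun w => !key w)) ++ (T ++ ws.filter key) := by
  intro ws
  induction ws with
  | nil => intro F T _ _; simp
  | cons x ws ih =>
      intro F T hF hT
      by_cases hx : key x = true
      · have hT' : ∀ y ∈ T ++ [x], key y = true := by
          intro y hy
          rcases List.mem_append.mp hy with h | h
          · exact hT y h
          · simp at h; simpa [h] using hx
        rw [List.foldl_cons, pv_ins_true key x hx, List.append_assoc, ih F (T ++ [x]) hF hT']
        simp [hx, List.append_assoc]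
      · have hx' : key x = false := by simpa using hx
        have hF' : ∀ y ∈ F ++ [x], key y = false := by
          intro y hy
          rcases List.mem_append.mp hy with h | h
          · exact hF y h
          · simp at h; simpa [h] using hx'
        rw [List.foldl_cons, pv_ins_false key x hx' F T hF hT]
        have hsplit : F ++ x :: T = (F ++ [x]) ++ T := by simp
        rw [hsplit, ih (F ++ [x]) T hF' hT]
        simp [hx', List.append_assoc]

-- a stable sort on a boolean key is exactly the two-block partition
theorem pv_sorted_bool {α : Type} (key : α → Bool) (ws : List α) :
    PySem.List.sorted ws key = ws.filter (fun w => !key w) ++ ws.filter key := by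
  rw [PySem.List.sorted_eq_foldl_insertBy]
  have := pv_foldl_ins key ws [] [] (by simp) (by simp)
  simpa using this

-- one step of A's loop, phrased as two conditional appends
theorem pv_Astep_eq (L U : List String) (x : String) :
    pvAstep (L, U) x
      = (L ++ (if !pvUpper0 x && pvLower0 x then [x] else []),
         U ++ (if pvUpper0 x then [x] else [])) := by
  unfold pvAstep pvUpper0 pvLower0
  cases h : PySem.Str.pyGet? x 0 with
  | none => simp
  | some c =>
      by_cases hu : PySem.Chars.isupper c = true
      · simp [hu]
      · by_cases hl : PySem.Chars.islower c = true
        · simp [hu, hl]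
        · simp [hu, hl]

-- A's loop collects exactly the upper-first and (not-upper ∧ lower)-first words, in order
theorem pv_Afold :
    ∀ (ws L U : List String),
      ws.foldl pvAstep (L, U)
        = (L ++ ws.filter (fun w => !pvUpper0 w && pvLower0 w), U ++ ws.filter pvUpper0) := by
  intro ws
  induction ws with
  | nil => intro L U; simp
  | cons x ws ih =>
      intro L U
      rw [List.foldl_cons, pv_Astep_eq, ih]
      cases hu : pvUpper0 x <;> cases hl : pvLower0 x <;>
        simp [hu, hl, List.append_assoc]

-- ===== VERDICT (by name: the statement is the Claim_ definition above) =====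
theorem capitals_first_spec : Claim_equal_capitals_first := by
  intro text _
  unfold Spec_capitals_first
  show PySem.Str.join " " (((PySem.Str.split₀ text).foldl pvAstep ([], [])).2
        ++ ((PySem.Str.split₀ text).foldl pvAstep ([], [])).1)
      = PySem.Str.join " "
          (PySem.List.sorted ((PySem.Str.split₀ text).filter (fun w => pvUpper0 w || pvLower0 w))
            (fun w => !pvUpper0 w))
  rw [pv_sorted_bool, List.filter_filter, List.filter_filter, pv_Afold (PySem.Str.split₀ text) [] []]
  simp only [List.nil_append]
  congr 2
  · apply List.filter_congr
    intro w _
    cases hu : pvUpper0 w <;> cases hl : pvLower0 w <;> simp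
  · apply List.filter_congr
    intro w _
    cases hu : pvUpper0 w <;> cases hl : pvLower0 w <;> simp
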